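-- pv_equiv track=rewrite | github.com/milairhu/helltaker_solver | SAT/SAT_Helltaker.py | at_leat_one_action
-- ===== SOURCE A (Python) =====
-- from typing import List, Tuple
--
-- def action_to_variable(nbCoupsCherche : int,a : str )-> int:
--     res=0
--
--     for nb in range(1,nbCoupsCherche):
--         res=res+4
--
--     #on est au coup cherché
--     if a=="H":
--         res=res+1
--     elif a=="D":
--         res=res+2
--     elif a=="B":
--         res=res+3
--     elif a=="G":
--         res=res+4
--
--     return res
--
-- def at_leat_one_action(nbActionsInit : int) -> List[List[int]] :
--
--     liste=[]
--     actions=["H","D","B","G"]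
--     for coups in range(1,nbActionsInit+1):
--         clause=[]
--         for a in actions :
--             clause.append(action_to_variable(coups,a))
--         liste.append(clause)
--
--     return liste
-- ===== SOURCE B (Python) =====
-- from typing import List
--
-- def at_leat_one_action(nbActionsInit: int) -> List[List[int]]:
--     return [[4 * k + 1, 4 * k + 2, 4 * k + 3, 4 * k + 4] for k in range(nbActionsInit)]
-- ===== Notes on version B (the rewrite author's own statement) =====
-- stated objective: faster
-- what changed: B emits each clause directly from closed-form arithmetic on the move index in a single comprehension, replacing A's per-clause helper that rebuilds the variable base with a linear accumulator loop for every move (quadratic total).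
import Mathlib
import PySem

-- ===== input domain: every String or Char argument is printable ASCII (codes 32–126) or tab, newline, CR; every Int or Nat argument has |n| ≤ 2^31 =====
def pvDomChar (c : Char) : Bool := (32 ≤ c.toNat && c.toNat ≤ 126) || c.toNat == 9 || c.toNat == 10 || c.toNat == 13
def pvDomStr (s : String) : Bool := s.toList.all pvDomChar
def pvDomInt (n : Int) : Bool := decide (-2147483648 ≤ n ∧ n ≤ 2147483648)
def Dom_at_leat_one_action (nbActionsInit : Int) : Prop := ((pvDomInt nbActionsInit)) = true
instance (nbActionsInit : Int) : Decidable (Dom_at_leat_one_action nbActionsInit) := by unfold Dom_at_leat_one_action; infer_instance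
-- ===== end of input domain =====

-- B replaces A's quadratic accumulator loops by a closed-form arithmetic comprehension (objective: faster).

-- ===== PORT A =====
def action_to_variable (nbCoupsCherche : Int) (a : String) : Int :=
  let res : Int := (PySem.List.pyRange 1 nbCoupsCherche 1).foldl (fun r _ => r + 4) 0
  if a = "H" then res + 1
  else if a = "D" then res + 2
  else if a = "B" then res + 3
  else if a = "G" then res + 4
  else res

def at_leat_one_action (nbActionsInit : Int) : List (List Int) :=
  (PySem.List.pyRange 1 (nbActionsInit + 1) 1).foldl
    (fun liste coups =>
      liste ++ [(["H", "D", "B", "G"]).foldl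
        (fun clause a => clause ++ [action_to_variable coups a]) []]) []

-- ===== PORT B =====
def at_leat_one_action_alt (nbActionsInit : Int) : List (List Int) :=
  (PySem.List.pyRange 0 nbActionsInit 1).map
    (fun k => [4 * k + 1, 4 * k + 2, 4 * k + 3, 4 * k + 4])

-- ===== PRECONDITION & SPEC =====
def Spec_at_leat_one_action (nbActionsInit : Int) (out : List (List Int)) : Prop := out = at_leat_one_action_alt nbActionsInit
instance (nbActionsInit : Int) (out : List (List Int)) : Decidable (Spec_at_leat_one_action nbActionsInit out) := by unfold Spec_at_leat_one_action; infer_instance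

-- ===== CLAIM (what is proved, stated in full; the proofs are below) =====
def Claim_equal_at_leat_one_action : Prop := ∀ (nbActionsInit : Int), Dom_at_leat_one_action nbActionsInit → Spec_at_leat_one_action nbActionsInit (at_leat_one_action nbActionsInit)

-- ===== LEMMAS AND PROOFS =====

-- A's inner accumulator loop computes 4*(nbCoupsCherche-1) for nbCoupsCherche = m+1.
lemma atv_loop (m : Nat) :
    (PySem.List.pyRange 1 ((m : Int) + 1) 1).foldl (fun r _ => r + 4) 0 = 4 * (m : Int) := by
  induction m with
  | zero => simp [PySem.List.pyRange_one_eq_nil]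
  | succ k ih =>
    rw [show (((k + 1 : Nat) : Int) + 1) = ((k : Int) + 1) + 1 by push_cast ; ring_nf]
    rw [PySem.List.pyRange_one_succ_right (by omega : (1:Int) ≤ (k:Int) + 1)]
    rw [List.foldl_append, ih]
    simp; push_cast; ring

lemma main_nat (m : Nat) :
    at_leat_one_action (m : Int) = at_leat_one_action_alt (m : Int) := by
  induction m with
  | zero =>
    simp [at_leat_one_action, at_leat_one_action_alt, PySem.List.pyRange_one_eq_nil]
  | succ k ih =>
    unfold at_leat_one_action at_leat_one_action_alt at ih ⊢
    rw [show (((k + 1 : Nat) : Int) + 1) = ((k : Int) + 1) + 1 by push_cast; ring]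
    rw [PySem.List.pyRange_one_succ_right (by omega : (1:Int) ≤ (k:Int) + 1), List.foldl_append]
    rw [show ((k + 1 : Nat) : Int) = (k : Int) + 1 by push_cast; ring]
    rw [show PySem.List.pyRange 0 ((k:Int)+1) 1 = PySem.List.pyRange 0 (k:Int) 1 ++ [(k:Int)] from
      PySem.List.pyRange_one_succ_right (by omega), List.map_append]
    rw [ih]
    simp [action_to_variable, atv_loop k]

-- ===== VERDICT (by name: the statement is the Claim_ definition above) =====
theorem at_leat_one_action_spec : Claim_equal_at_leat_one_action := by
  intro n _
  unfold Spec_at_leat_one_action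
  rcases le_or_gt n 0 with h | h
  · unfold at_leat_one_action at_leat_one_action_alt
    rw [PySem.List.pyRange_one_eq_nil (by omega), PySem.List.pyRange_one_eq_nil (by omega)]
    rfl
  · have : n = (n.toNat : Int) := by omega
    rw [this]
    exact main_nat n.toNat
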